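-- pv_equiv track=rewrite | github.com/hardyek/mahgym | core/engine/utils.py | is_valid_14
-- ===== SOURCE A (Python) =====
-- from typing import List, Tuple
--
-- def can_form_four_melds(hand: List[int], exposed: List[List[int]]) -> bool:
--     """
--
--     Checks if the list of tiles in hand and exposed melds together make 4 valid melds.
--
--     Args:
--         hand (List[int]): The players hand.
--         exposed (List[List[int]]): The list of pre-exposed melds of the player.
--
--     Returns:
--         bool: Y/N
--     """
--     sets_needed = 4 - len(exposed)
--     if sets_needed == 0:
--         return len(hand) == 0
--
--     hand = sorted(hand)
--     if len(hand) < 3: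
--         return False
--
--     # Try PUNG
--     if hand[0] == hand[1] == hand[2]:
--         if can_form_four_melds(hand[3:], exposed + [[hand[0]]*3]):
--             return True
--
--     # Try SOENG
--     if hand[0] + 1 in hand and hand[0] + 2 in hand:
--         new_hand = hand[:]
--         for i in range(3):
--             new_hand.remove(hand[0] + i)
--         if can_form_four_melds(new_hand, exposed + [[hand[0], hand[0]+1, hand[0]+2]]):
--             return True
--
--     return False
--
-- def is_valid_14(hand: List[int], exposed: List[List[int]]) -> bool:
--     """
--
--     Does the player have a valid set of 14 tiles (forming 4 valid melds) to declare mahjong,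
--
--     Note that it may not be 14 due to gongs but it is effectively 14.
--
--     Args:
--         hand (List[int]): The players hand.
--         exposed (List[List[int]]): The list of pre-exposed melds of the player.
--
--     Returns:
--         bool: Y/N
--     """
--     sorted_hand = sorted(hand)
--                                            # thirteen orphans tiles set
--     if len(exposed) == 0 and set(hand) ==  {1,9,11,19,21,29,31,32,33,34,41,42,43}:
--         return True
--
--     for tile in set(sorted_hand):
--         if sorted_hand.count(tile) >= 2:
--             remaining = sorted_hand[:]
--             remaining.remove(tile)
--             remaining.remove(tile)
--             if can_form_four_melds(remaining, exposed):
--                 return True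
--     return False
-- ===== SOURCE B (Python) =====
-- from typing import List
--
-- def _greedy(counts):
--     # Decompose counts into pungs and runs: at each value v (increasing),
--     # use count[v] % 3 runs (v, v+1, v+2) and pungs for the rest.
--     for v in sorted(counts):
--         c = counts[v]
--         if c <= 0:
--             continue
--         r = c % 3
--         if r:
--             if counts.get(v + 1, 0) < r or counts.get(v + 2, 0) < r:
--                 return False
--             counts[v + 1] -= r
--             counts[v + 2] -= r
--     return True
--
-- def is_valid_14(hand: List[int], exposed: List[List[int]]) -> bool:
--     if len(exposed) == 0 and set(hand) == {1,9,11,19,21,29,31,32,33,34,41,42,43}: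
--         return True
--     sets_needed = 4 - len(exposed)
--     if sets_needed < 0 or len(hand) != 3 * sets_needed + 2:
--         return False
--     counts = {}
--     for t in hand:
--         counts[t] = counts.get(t, 0) + 1
--     for pair in counts:
--         if counts[pair] >= 2:
--             c = dict(counts)
--             c[pair] -= 2
--             if _greedy(c):
--                 return True
--     return False
-- ===== Notes on version B (the rewrite author's own statement) =====
-- stated objective: faster
-- what changed: Replaces A's sort/remove recursive backtracking over candidate pungs and runs by a tile-count map per pair candidate and a deterministic one-pass greedy decomposition (use count%3 runs at each value in increasing order, pungs for the rest), proved equivalent to the exhaustive search by an exchange argument.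
import Mathlib
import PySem

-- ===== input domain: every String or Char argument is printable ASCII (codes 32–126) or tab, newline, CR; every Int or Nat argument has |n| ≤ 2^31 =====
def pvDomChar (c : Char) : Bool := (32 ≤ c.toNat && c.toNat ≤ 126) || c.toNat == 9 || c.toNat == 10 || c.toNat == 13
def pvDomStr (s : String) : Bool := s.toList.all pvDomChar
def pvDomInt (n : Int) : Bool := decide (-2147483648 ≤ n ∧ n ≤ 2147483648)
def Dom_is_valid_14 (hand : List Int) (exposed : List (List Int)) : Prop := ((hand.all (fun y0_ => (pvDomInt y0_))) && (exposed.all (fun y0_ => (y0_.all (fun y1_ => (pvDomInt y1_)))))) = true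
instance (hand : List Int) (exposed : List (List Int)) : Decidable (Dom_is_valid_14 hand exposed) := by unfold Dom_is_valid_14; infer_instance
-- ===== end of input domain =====

-- B replaces A's sort/remove backtracking search by a tile-count map and a deterministic
-- greedy mod-3 run/pung decomposition per pair candidate (objective: alternative/simpler).

-- termination helper for the ports (cited by decreasing_by)
theorem pvRemoveLen {xs ys : List Int} {v : Int} (h : PySem.List.remove? xs v = some ys) :
    ys.length + 1 = xs.length := by
  have hv : v ∈ xs := by
    by_contra hv
    rw [(PySem.List.remove?_eq_none_iff xs v).2 hv] at h; cases h
  rw [PySem.List.remove?_eq_some_erase xs v hv] at h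
  injection h with h'
  subst h'
  have h1 := List.length_erase_of_mem hv
  have h2 := List.length_pos_of_mem hv
  omega

-- ===== PORT A =====
def can_form_four_melds (hand : List Int) (exposed : List (List Int)) : Bool :=
  let sets_needed : Int := 4 - (exposed.length : Int)
  if sets_needed == 0 then hand.length == 0
  else
    let hand' := PySem.List.sorted hand (fun x => x) false
    if hand'.length < 3 then false
    else
      match hh : hand' with
      | a :: b :: c :: rest =>
        -- Try PUNG
        if (a == b && b == c) &&
            can_form_four_melds rest (exposed ++ [[a, a, a]]) then true
        else
          -- Try SOENG
          if ((a + 1) ∈ hand') && ((a + 2) ∈ hand') then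
            -- for i in range(3): new_hand.remove(hand[0] + i); all three removes succeed here
            match h0 : PySem.List.remove? hand' a with
            | none => false
            | some n0 =>
              match h1 : PySem.List.remove? n0 (a + 1) with
              | none => false
              | some n1 =>
                match h2 : PySem.List.remove? n1 (a + 2) with
                | none => false
                | some n2 => can_form_four_melds n2 (exposed ++ [[a, a + 1, a + 2]])
          else false
      | _ => false
termination_by hand.length
decreasing_by
  · have hs := PySem.List.length_sorted hand (fun x => x) false
    have hl := congrArg List.length hh
    have hteq : hand'.length = hand.length := hs
    simp only [List.length_cons] at hl
    omega
  · have hs := PySem.List.length_sorted hand (fun x => x) false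
    have hteq : hand'.length = hand.length := hs
    have e0 := pvRemoveLen h0
    have e1 := pvRemoveLen h1
    have e2 := pvRemoveLen h2
    omega

def is_valid_14 (hand : List Int) (exposed : List (List Int)) : Bool :=
  let sorted_hand := PySem.List.sorted hand (fun x => x) false
  if exposed.length == 0 &&
      PySem.Set.equal (PySem.Set.ofList hand)
        (PySem.Set.ofList ([1,9,11,19,21,29,31,32,33,34,41,42,43] : List Int)) then true
  else
    -- for tile in set(sorted_hand): … return True on first success (order-independent: any)
    (PySem.Set.ofList sorted_hand).any (fun tile =>
      if 2 ≤ sorted_hand.count tile then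
        match PySem.List.remove? sorted_hand tile with
        | none => false
        | some r0 =>
          match PySem.List.remove? r0 tile with
          | none => false
          | some remaining => can_form_four_melds remaining exposed
      else false)

-- ===== PORT B =====
def pvGreedyGo : List Int → PySem.Dict Int Int → Bool
  | [], _ => true
  | v :: vs, counts =>
    let c := counts.getD v 0
    if c ≤ 0 then pvGreedyGo vs counts
    else
      let r := PySem.Int.mod c 3
      if r ≠ 0 then
        if counts.getD (v + 1) 0 < r || counts.getD (v + 2) 0 < r then false
        else
          let c1 := counts.insert (v + 1) (counts.getD (v + 1) 0 - r)
          let c2 := c1.insert (v + 2) (c1.getD (v + 2) 0 - r)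
          pvGreedyGo vs c2
      else pvGreedyGo vs counts

def pvGreedy (counts : PySem.Dict Int Int) : Bool :=
  pvGreedyGo (PySem.List.sorted counts.keys (fun x => x) false) counts

def is_valid_14_alt (hand : List Int) (exposed : List (List Int)) : Bool :=
  if exposed.length == 0 &&
      PySem.Set.equal (PySem.Set.ofList hand)
        (PySem.Set.ofList ([1,9,11,19,21,29,31,32,33,34,41,42,43] : List Int)) then true
  else
    let sets_needed : Int := 4 - (exposed.length : Int)
    if sets_needed < 0 || (hand.length : Int) ≠ 3 * sets_needed + 2 then false
    else
      let counts := hand.foldl (fun d t => d.insert t (d.getD t 0 + 1)) PySem.Dict.empty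
      counts.keys.any (fun pair =>
        if 2 ≤ counts.getD pair 0 then
          pvGreedy (counts.insert pair (counts.getD pair 0 - 2))
        else false)

-- ===== PRECONDITION & SPEC =====
def Spec_is_valid_14 (hand : List Int) (exposed : List (List Int)) (out : Bool) : Prop := out = is_valid_14_alt hand exposed
instance (hand : List Int) (exposed : List (List Int)) (out : Bool) : Decidable (Spec_is_valid_14 hand exposed out) := by unfold Spec_is_valid_14; infer_instance

-- ===== CLAIM (what is proved, stated in full; the proofs are below) =====
def Claim_equal_is_valid_14 : Prop := ∀ (hand : List Int) (exposed : List (List Int)), Dom_is_valid_14 hand exposed → Spec_is_valid_14 hand exposed (is_valid_14 hand exposed)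

-- ===== LEMMAS AND PROOFS =====

-- A hand decomposes into k melds (each a pung v,v,v or a run v,v+1,v+2)
inductive pvDecomp : Multiset Int → Nat → Prop
  | nil : pvDecomp 0 0
  | pung (v : Int) {m : Multiset Int} {k : Nat} : pvDecomp m k → pvDecomp ({v, v, v} + m) (k + 1)
  | run (v : Int) {m : Multiset Int} {k : Nat} : pvDecomp m k → pvDecomp ({v, v + 1, v + 2} + m) (k + 1)

theorem pvDecomp_card {m : Multiset Int} {k : Nat} (h : pvDecomp m k) : Multiset.card m = 3 * k := by
  induction h with
  | nil => simp
  | pung v _ ih => simp [ih]; ring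
  | run v _ ih => simp [ih]; ring

theorem pvDecomp_zero {m : Multiset Int} (h : pvDecomp m 0) : m = 0 := by
  have := pvDecomp_card h
  simpa using this

-- any meld containing the minimal element is a pung at it or a run starting at it
theorem pvDecomp_min_cases : ∀ {m : Multiset Int} {k : Nat}, pvDecomp m k →
    ∀ v : Int, v ∈ m → (∀ x ∈ m, v ≤ x) →
    ∃ k', k = k' + 1 ∧
      ((∃ m₂, m = {v, v, v} + m₂ ∧ pvDecomp m₂ k') ∨
       (∃ m₂, m = {v, v + 1, v + 2} + m₂ ∧ pvDecomp m₂ k')) := by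
  intro m k hd
  induction hd with
  | nil => intro v hv _; simp at hv
  | @pung w m' k' hd ih =>
    intro v hv hmin
    by_cases hvw : v = w
    · subst hvw
      exact ⟨k', rfl, Or.inl ⟨m', rfl, hd⟩⟩
    · have hv' : v ∈ m' := by
        rcases Multiset.mem_add.1 hv with h | h
        · simp at h; omega
        · exact h
      have hmin' : ∀ x ∈ m', v ≤ x := fun x hx => hmin x (Multiset.mem_add.2 (Or.inr hx))
      obtain ⟨k₀, rfl, hcase⟩ := ih v hv' hmin'
      refine ⟨k₀ + 1, rfl, ?_⟩
      rcases hcase with ⟨m₂, rfl, hd₂⟩ | ⟨m₂, rfl, hd₂⟩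
      · exact Or.inl ⟨{w, w, w} + m₂, by rw [add_left_comm], pvDecomp.pung w hd₂⟩
      · exact Or.inr ⟨{w, w, w} + m₂, by rw [add_left_comm], pvDecomp.pung w hd₂⟩
  | @run w m' k' hd ih =>
    intro v hv hmin
    have hvw : v ≤ w := hmin w (Multiset.mem_add.2 (Or.inl (by simp)))
    by_cases hmem : v ∈ ({w, w + 1, w + 2} : Multiset Int)
    · have hvew : v = w := by
        simp only [Multiset.insert_eq_cons, Multiset.mem_cons, Multiset.mem_singleton] at hmem
        omega
      subst hvew
      exact ⟨k', rfl, Or.inr ⟨m', rfl, hd⟩⟩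
    · have hv' : v ∈ m' := by
        rcases Multiset.mem_add.1 hv with h | h
        · exact absurd h hmem
        · exact h
      have hmin' : ∀ x ∈ m', v ≤ x := fun x hx => hmin x (Multiset.mem_add.2 (Or.inr hx))
      obtain ⟨k₀, rfl, hcase⟩ := ih v hv' hmin'
      refine ⟨k₀ + 1, rfl, ?_⟩
      rcases hcase with ⟨m₂, rfl, hd₂⟩ | ⟨m₂, rfl, hd₂⟩
      · exact Or.inl ⟨{w, w + 1, w + 2} + m₂, by rw [add_left_comm], pvDecomp.run w hd₂⟩
      · exact Or.inr ⟨{w, w + 1, w + 2} + m₂, by rw [add_left_comm], pvDecomp.run w hd₂⟩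

theorem pvTriple (v : Int) : ({v, v, v} : Multiset Int) = Multiset.replicate 3 v := rfl

theorem pvDecomp_add_pungs (p : Nat) {m : Multiset Int} {k : Nat} (v : Int) (h : pvDecomp m k) :
    pvDecomp (Multiset.replicate (3 * p) v + m) (k + p) := by
  induction p with
  | zero => simpa using h
  | succ p ih =>
    have h3 : 3 * (p + 1) = 3 + 3 * p := by ring
    have := pvDecomp.pung v ih
    rw [h3, Multiset.replicate_add]
    simpa [pvTriple, add_assoc] using this

theorem pvDecomp_add_runs (r : Nat) {m : Multiset Int} {k : Nat} (v : Int) (h : pvDecomp m k) :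
    pvDecomp (Multiset.replicate r v + Multiset.replicate r (v + 1) + Multiset.replicate r (v + 2) + m)
      (k + r) := by
  induction r with
  | zero => simpa using h
  | succ r ih =>
    have hrec := pvDecomp.run v ih
    have heq : Multiset.replicate (r + 1) v + Multiset.replicate (r + 1) (v + 1) +
        Multiset.replicate (r + 1) (v + 2) + m
        = {v, v + 1, v + 2} +
          (Multiset.replicate r v + Multiset.replicate r (v + 1) + Multiset.replicate r (v + 2) + m) := by
      ext a
      simp only [Multiset.insert_eq_cons, Multiset.count_cons, Multiset.count_replicate,
        Multiset.count_add, Multiset.count_singleton]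
      split_ifs <;> omega
    rw [heq]
    exact hrec

-- exchange lemma: every decomposition uses exactly c%3 runs at the minimal value v (c = count v)
theorem pvGreedyStep (c : Nat) : ∀ {m : Multiset Int} {k : Nat} {v : Int},
    m.count v = c → 0 < c → (∀ x ∈ m, v ≤ x) → pvDecomp m k →
    ∃ m' k',
      m = (Multiset.replicate c v + Multiset.replicate (c % 3) (v + 1) +
           Multiset.replicate (c % 3) (v + 2)) + m' ∧
      k = k' + (c / 3 + c % 3) ∧ pvDecomp m' k' := by
  induction c using Nat.strong_induction_on with
  | _ c ihc =>
  intro m k v hc hpos hmin hd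
  have hvm : v ∈ m := Multiset.count_pos.1 (by omega)
  obtain ⟨k₀, rfl, hcase⟩ := pvDecomp_min_cases hd v hvm hmin
  rcases hcase with ⟨m₂, rfl, hd₂⟩ | ⟨m₂, rfl, hd₂⟩
  · -- the meld at v is a pung
    have hc3 : c = 3 + m₂.count v := by
      rw [← hc]
      simp only [Multiset.insert_eq_cons, Multiset.count_cons, Multiset.count_add,
        Multiset.count_singleton]
      split_ifs <;> omega
    have hmin₂ : ∀ x ∈ m₂, v ≤ x := fun x hx => hmin x (Multiset.mem_add.2 (Or.inr hx))
    by_cases h0 : m₂.count v = 0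
    · refine ⟨m₂, k₀, ?_, by omega, hd₂⟩
      have hcv : c = 3 := by omega
      subst hcv
      ext a
      simp only [Multiset.insert_eq_cons, Multiset.count_cons, Multiset.count_replicate,
        Multiset.count_add, Multiset.count_singleton]
      split_ifs <;> omega
    · obtain ⟨m', k', hmeq, hkeq, hd'⟩ :=
        ihc (c - 3) (by omega) (by omega) (by omega) hmin₂ hd₂
      refine ⟨m', k', ?_, by omega, hd'⟩
      rw [hmeq]
      ext a
      simp only [Multiset.insert_eq_cons, Multiset.count_cons, Multiset.count_replicate,
        Multiset.count_add, Multiset.count_singleton]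
      split_ifs <;> omega
  · -- the meld at v is a run
    have hc1 : c = 1 + m₂.count v := by
      rw [← hc]
      simp only [Multiset.insert_eq_cons, Multiset.count_cons, Multiset.count_add,
        Multiset.count_singleton]
      split_ifs <;> omega
    have hmin₂ : ∀ x ∈ m₂, v ≤ x := fun x hx => hmin x (Multiset.mem_add.2 (Or.inr hx))
    by_cases h0 : m₂.count v = 0
    · refine ⟨m₂, k₀, ?_, by omega, hd₂⟩
      have hcv : c = 1 := by omega
      subst hcv
      ext a
      simp only [Multiset.insert_eq_cons, Multiset.count_cons, Multiset.count_replicate,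
        Multiset.count_add, Multiset.count_singleton]
      split_ifs <;> omega
    · obtain ⟨m'', k'', hmeq, hkeq, hd''⟩ :=
        ihc (c - 1) (by omega) (by omega) (by omega) hmin₂ hd₂
      by_cases hr : c % 3 = 0
      · -- two of the three pending runs become pungs of v+1 and v+2
        refine ⟨{v + 1, v + 1, v + 1} + ({v + 2, v + 2, v + 2} + m''), k'' + 2, ?_, by omega,
          pvDecomp.pung (v + 1) (pvDecomp.pung (v + 2) hd'')⟩
        rw [hmeq]
        ext a
        simp only [Multiset.insert_eq_cons, Multiset.count_cons, Multiset.count_replicate,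
          Multiset.count_add, Multiset.count_singleton]
        split_ifs <;> omega
      · refine ⟨m'', k'', ?_, by omega, hd''⟩
        rw [hmeq]
        ext a
        simp only [Multiset.insert_eq_cons, Multiset.count_cons, Multiset.count_replicate,
          Multiset.count_add, Multiset.count_singleton]
        split_ifs <;> omega

-- characterization of port A
theorem pvCoeCons (a : Int) (l : List Int) : ((a :: l : List Int) : Multiset Int) = a ::ₘ (↑l : Multiset Int) := rfl

theorem pvTripleAdd (u v w : Int) (s : Multiset Int) :
    ({u, v, w} : Multiset Int) + s = u ::ₘ v ::ₘ w ::ₘ s := by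
  simp only [Multiset.insert_eq_cons, Multiset.cons_add, Multiset.singleton_add]

theorem pvCffm_char : ∀ (hand : List Int) (exposed : List (List Int)),
    can_form_four_melds hand exposed = true ↔
      ∃ k : Nat, (k : Int) = 4 - exposed.length ∧ pvDecomp (↑hand) k := by
  suffices H : ∀ (n : Nat) (hand : List Int), hand.length ≤ n → ∀ (exposed : List (List Int)),
      (can_form_four_melds hand exposed = true ↔
        ∃ k : Nat, (k : Int) = 4 - exposed.length ∧ pvDecomp (↑hand) k) by
    exact fun hand exposed => H hand.length hand le_rfl exposed
  intro n
  induction n using Nat.strong_induction_on with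
  | _ n ih =>
  intro hand hlen exposed
  rw [can_form_four_melds.eq_def]
  by_cases hsn : (4 : Int) - exposed.length = 0
  · rw [if_pos (by simp [hsn])]
    constructor
    · intro h
      have hnil : hand = [] := by simpa using h
      subst hnil
      exact ⟨0, by omega, by exact pvDecomp.nil⟩
    · rintro ⟨k, hk, hd⟩
      have hk0 : k = 0 := by omega
      subst hk0
      have := pvDecomp_zero hd
      have : hand = [] := by simpa using this
      simp [this]
  · rw [if_neg (by simp [hsn])]
    generalize hsort : PySem.List.sorted hand (fun x => x) false = hand'
    have hperm : hand'.Perm hand := hsort ▸ PySem.List.sorted_perm hand (fun x => x) false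
    have hlenq : hand'.length = hand.length := hperm.length_eq
    have hmcoe : (↑hand : Multiset Int) = (↑hand' : Multiset Int) :=
      (Multiset.coe_eq_coe.2 hperm).symm
    by_cases h3 : hand'.length < 3
    · rw [if_pos h3]
      simp only [Bool.false_eq_true, false_iff]
      rintro ⟨k, hk, hd⟩
      have hcard := pvDecomp_card hd
      rw [Multiset.coe_card] at hcard
      omega
    · rw [if_neg h3]
      rcases hand' with _ | ⟨a, _ | ⟨b, _ | ⟨c, rest⟩⟩⟩ <;>
        simp only [List.length_cons, List.length_nil] at h3 hlenq
      · omega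
      · omega
      · omega
      -- hand' = a :: b :: c :: rest, sorted
      dsimp only
      have hpw : (a :: b :: c :: rest).Pairwise (fun p q => p ≤ q) := by
        have := PySem.List.sorted_pairwise hand (fun x => x)
        rwa [hsort] at this
      obtain ⟨hpa, hpw1⟩ := List.pairwise_cons.1 hpw
      obtain ⟨hpb, hpw2⟩ := List.pairwise_cons.1 hpw1
      obtain ⟨hpc, _⟩ := List.pairwise_cons.1 hpw2
      have hmin : ∀ x ∈ (↑hand : Multiset Int), a ≤ x := by
        intro x hx
        rw [hmcoe] at hx
        rcases List.mem_cons.1 (Multiset.mem_coe.1 hx) with rfl | hx'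
        · exact le_refl x
        · exact hpa x hx'
      have hIH : ∀ (h2 : List Int), h2.length + 3 = hand.length → ∀ exp2 : List (List Int),
          exp2.length = exposed.length + 1 →
          (can_form_four_melds h2 exp2 = true ↔
            ∃ k : Nat, (k : Int) = 3 - exposed.length ∧ pvDecomp (↑h2) k) := by
        intro h2 hl2 exp2 he2
        rw [ih (n - 1) (by omega) h2 (by omega) exp2]
        constructor
        · rintro ⟨k, hk, hd⟩
          refine ⟨k, ?_, hd⟩
          rw [he2] at hk; push_cast at hk ⊢; omega
        · rintro ⟨k, hk, hd⟩
          refine ⟨k, ?_, hd⟩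
          rw [he2]; push_cast at hk ⊢; omega
      constructor
      · -- port A returns true → a decomposition exists
        intro h
        by_cases hx : (a == b && b == c && can_form_four_melds rest (exposed ++ [[a, a, a]])) = true
        · simp only [Bool.and_eq_true, beq_iff_eq] at hx
          obtain ⟨⟨hab, hbc⟩, hrec⟩ := hx
          rw [hIH rest (by omega) _ (by simp)] at hrec
          obtain ⟨k', hk', hd'⟩ := hrec
          refine ⟨k' + 1, by push_cast at hk' ⊢; omega, ?_⟩
          rw [hmcoe, ← hab, ← hbc] at *
          rw [pvCoeCons, pvCoeCons, pvCoeCons, ← pvTripleAdd]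
          exact pvDecomp.pung a hd'
        · rw [if_neg hx] at h
          by_cases hq : (decide (a + 1 ∈ a :: b :: c :: rest) && decide (a + 2 ∈ a :: b :: c :: rest)) = true
          · rw [if_pos hq] at h
            simp only [Bool.and_eq_true, decide_eq_true_eq] at hq
            obtain ⟨hq1, hq2⟩ := hq
            have hq1' : a + 1 ∈ b :: c :: rest := by
              rcases List.mem_cons.1 hq1 with h' | h'
              · omega
              · exact h'
            have hq2' : a + 2 ∈ b :: c :: rest := by
              rcases List.mem_cons.1 hq2 with h' | h'
              · omega
              · exact h'
            have hq2'' : a + 2 ∈ (b :: c :: rest).erase (a + 1) :=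
              (List.mem_erase_of_ne (by omega)).2 hq2'
            rw [PySem.List.remove?_cons_self] at h
            dsimp only at h
            rw [PySem.List.remove?_eq_some_erase _ _ hq1'] at h
            dsimp only at h
            rw [PySem.List.remove?_eq_some_erase _ _ hq2''] at h
            dsimp only at h
            have hl2 : (((b :: c :: rest).erase (a + 1)).erase (a + 2)).length + 3 = hand.length := by
              have e1 := List.length_erase_of_mem hq1'
              have e2 := List.length_erase_of_mem hq2''
              simp only [List.length_cons] at e1 e2 ⊢
              omega
            rw [hIH _ hl2 _ (by simp)] at h
            obtain ⟨k', hk', hd'⟩ := h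
            refine ⟨k' + 1, by push_cast at hk' ⊢; omega, ?_⟩
            have p1 : (↑(b :: c :: rest) : Multiset Int) =
                (a + 1) ::ₘ ↑((b :: c :: rest).erase (a + 1)) :=
              Multiset.coe_eq_coe.2 (List.perm_cons_erase hq1')
            have p2 : (↑((b :: c :: rest).erase (a + 1)) : Multiset Int) =
                (a + 2) ::ₘ ↑(((b :: c :: rest).erase (a + 1)).erase (a + 2)) :=
              Multiset.coe_eq_coe.2 (List.perm_cons_erase hq2'')
            rw [hmcoe, pvCoeCons, p1, p2, ← pvTripleAdd]
            exact pvDecomp.run a hd'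
          · rw [if_neg hq] at h
            simp at h
      · -- a decomposition exists → port A returns true
        rintro ⟨k, hk, hd⟩
        have hka : a ∈ (↑hand : Multiset Int) := by
          rw [hmcoe]; exact Multiset.mem_coe.2 (List.mem_cons_self ..)
        obtain ⟨k₀, rfl, hcase⟩ := pvDecomp_min_cases hd a hka hmin
        rcases hcase with ⟨m₂, hm₂, hd₂⟩ | ⟨m₂, hm₂, hd₂⟩
        · -- pung at a: the three smallest tiles are all a
          have hcq : Multiset.count a (↑hand : Multiset Int) = 3 + m₂.count a := by
            rw [hm₂]
            simp only [Multiset.insert_eq_cons, Multiset.count_add, Multiset.count_cons,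
              Multiset.count_singleton]
            split_ifs <;> omega
          rw [hmcoe] at hcq
          rw [Multiset.coe_count] at hcq
          have hcb : c = a := by
            by_contra hne
            have hac : a < c := lt_of_le_of_ne (hpa c (by simp)) (Ne.symm hne)
            have hrest0 : List.count a rest = 0 := by
              refine List.count_eq_zero.2 (fun hmem => ?_)
              have := hpc a hmem
              omega
            simp only [List.count_cons, beq_iff_eq] at hcq
            rw [hrest0] at hcq
            split_ifs at hcq <;> omega
          have hcbb : b = a := le_antisymm (by have := hpb c (by simp); omega) (hpa b (by simp))
          have hrest : (↑rest : Multiset Int) = m₂ := by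
            have : (↑hand : Multiset Int) = ({a, a, a} : Multiset Int) + ↑rest := by
              rw [hmcoe, hcb, hcbb, pvCoeCons, pvCoeCons, pvCoeCons, ← pvTripleAdd]
            rw [this] at hm₂
            exact add_left_cancel hm₂
          have hrec : can_form_four_melds rest (exposed ++ [[a, a, a]]) = true := by
            rw [hIH rest (by omega) _ (by simp)]
            exact ⟨k₀, by push_cast at hk ⊢; omega, hrest ▸ hd₂⟩
          rw [if_pos (by simp [hcb, hcbb, hrec])]
        · -- run at a
          have hmem1 : a + 1 ∈ (↑hand : Multiset Int) := by
            rw [hm₂]; rw [pvTripleAdd]; simp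
          have hmem2 : a + 2 ∈ (↑hand : Multiset Int) := by
            rw [hm₂]; rw [pvTripleAdd]; simp
          rw [hmcoe, Multiset.mem_coe] at hmem1 hmem2
          have hq1' : a + 1 ∈ b :: c :: rest := by
            rcases List.mem_cons.1 hmem1 with h' | h'
            · omega
            · exact h'
          have hq2' : a + 2 ∈ b :: c :: rest := by
            rcases List.mem_cons.1 hmem2 with h' | h'
            · omega
            · exact h'
          have hq2'' : a + 2 ∈ (b :: c :: rest).erase (a + 1) :=
            (List.mem_erase_of_ne (by omega)).2 hq2'
          have p1 : (↑(b :: c :: rest) : Multiset Int) =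
              (a + 1) ::ₘ ↑((b :: c :: rest).erase (a + 1)) :=
            Multiset.coe_eq_coe.2 (List.perm_cons_erase hq1')
          have p2 : (↑((b :: c :: rest).erase (a + 1)) : Multiset Int) =
              (a + 2) ::ₘ ↑(((b :: c :: rest).erase (a + 1)).erase (a + 2)) :=
            Multiset.coe_eq_coe.2 (List.perm_cons_erase hq2'')
          have hn2 : (↑(((b :: c :: rest).erase (a + 1)).erase (a + 2)) : Multiset Int) = m₂ := by
            have : (↑hand : Multiset Int) = ({a, a + 1, a + 2} : Multiset Int) +
                ↑(((b :: c :: rest).erase (a + 1)).erase (a + 2)) := by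
              rw [hmcoe, pvCoeCons, p1, p2, ← pvTripleAdd]
            rw [this] at hm₂
            exact add_left_cancel hm₂
          have hl2 : (((b :: c :: rest).erase (a + 1)).erase (a + 2)).length + 3 = hand.length := by
            have e1 := List.length_erase_of_mem hq1'
            have e2 := List.length_erase_of_mem hq2''
            simp only [List.length_cons] at e1 e2 ⊢
            omega
          have hrec : can_form_four_melds (((b :: c :: rest).erase (a + 1)).erase (a + 2))
              (exposed ++ [[a, a + 1, a + 2]]) = true := by
            rw [hIH _ hl2 _ (by simp)]
            exact ⟨k₀, by push_cast at hk ⊢; omega, hn2 ▸ hd₂⟩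
          by_cases hx : (a == b && b == c && can_form_four_melds rest (exposed ++ [[a, a, a]])) = true
          · rw [if_pos hx]
          · rw [if_neg hx]
            rw [if_pos (by simp [List.mem_cons.2 (Or.inr hq1'), List.mem_cons.2 (Or.inr hq2')])]
            rw [PySem.List.remove?_cons_self]
            dsimp only
            rw [PySem.List.remove?_eq_some_erase _ _ hq1']
            dsimp only
            rw [PySem.List.remove?_eq_some_erase _ _ hq2'']
            dsimp only
            exact hrec

-- the multiset a counts dict represents on the not-yet-processed keys vs
def pvM (vs : List Int) (c : PySem.Dict Int Int) : Multiset Int :=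
  (vs.map (fun v => Multiset.replicate (c.getD v 0).toNat v)).sum

theorem pvM_count : ∀ {vs : List Int}, vs.Nodup → ∀ (c : PySem.Dict Int Int) (x : Int),
    (pvM vs c).count x = if x ∈ vs then (c.getD x 0).toNat else 0 := by
  intro vs
  induction vs with
  | nil => intro _ c x; simp [pvM]
  | cons v vs ih =>
    intro hn c x
    have hstep : pvM (v :: vs) c = Multiset.replicate (c.getD v 0).toNat v + pvM vs c := rfl
    rw [hstep]
    rcases List.nodup_cons.1 hn with ⟨hv, hn'⟩
    rw [Multiset.count_add, Multiset.count_replicate, ih hn' c x]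
    by_cases hx : x = v
    · subst hx; simp [hv]
    · simp [hx, List.mem_cons]
      tauto

theorem pvM_mem : ∀ {vs : List Int} {c : PySem.Dict Int Int} {x : Int}, x ∈ pvM vs c → x ∈ vs := by
  intro vs
  induction vs with
  | nil => intro c x h; simp [pvM] at h
  | cons v vs ih =>
    intro c x h
    have hstep : pvM (v :: vs) c = Multiset.replicate (c.getD v 0).toNat v + pvM vs c := rfl
    rw [hstep, Multiset.mem_add] at h
    rcases h with h | h
    · exact (Multiset.eq_of_mem_replicate h) ▸ List.mem_cons_self ..
    · exact List.mem_cons_of_mem _ (ih h)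

-- counts of the represented multiset, as lookups (uses the invariant H below)
theorem pvM_count_ge {vs : List Int} (hn : vs.Nodup) (c : PySem.Dict Int Int)
    (hH : ∀ x : Int, 0 < c.getD x 0 → (∃ w ∈ vs, w ≤ x) → x ∈ vs)
    (v x : Int) (hv : v ∈ vs) (hvx : v ≤ x) :
    (pvM vs c).count x = (c.getD x 0).toNat := by
  rw [pvM_count hn]
  by_cases hx : x ∈ vs
  · simp [hx]
  · have : ¬ 0 < c.getD x 0 := fun hpos => hx (hH x hpos ⟨v, hv, hvx⟩)
    simp only [hx, if_false]
    omega

-- characterization of B's greedy scan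
set_option maxHeartbeats 2000000 in
theorem pvGreedyGo_char : ∀ (vs : List Int) (c : PySem.Dict Int Int),
    vs.Pairwise (· < ·) →
    (∀ x : Int, 0 < c.getD x 0 → (∃ w ∈ vs, w ≤ x) → x ∈ vs) →
    (∀ x : Int, 0 ≤ c.getD x 0) →
    (pvGreedyGo vs c = true ↔ ∃ k, pvDecomp (pvM vs c) k) := by
  intro vs
  induction vs with
  | nil =>
    intro c _ _ _
    simp only [pvGreedyGo, true_iff]
    exact ⟨0, pvDecomp.nil⟩
  | cons v vs ih =>
    intro c hpw hH hnn
    have hnd : (v :: vs).Nodup := hpw.nodup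
    obtain ⟨hvvs, hnd'⟩ := List.nodup_cons.1 hnd
    have hlt : ∀ w ∈ vs, v < w := fun w hw => (List.pairwise_cons.1 hpw).1 w hw
    have hstep : pvM (v :: vs) c = Multiset.replicate (c.getD v 0).toNat v + pvM vs c := rfl
    have hminM : ∀ x ∈ pvM (v :: vs) c, v ≤ x := by
      intro x hx
      rcases List.mem_cons.1 (pvM_mem hx) with rfl | hx'
      · exact le_refl x
      · exact le_of_lt (hlt x hx')
    have hcount_v : (pvM (v :: vs) c).count v = (c.getD v 0).toNat := by
      rw [pvM_count hnd]
      simp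
    rw [pvGreedyGo]
    by_cases hc0 : c.getD v 0 ≤ 0
    · rw [if_pos hc0]
      have hMeq : pvM (v :: vs) c = pvM vs c := by
        rw [hstep, Int.toNat_of_nonpos hc0]
        simp
      rw [hMeq]
      refine ih c (List.pairwise_cons.1 hpw).2 ?_ hnn
      intro x hx ⟨w, hw, hwx⟩
      rcases List.mem_cons.1 (hH x hx ⟨w, List.mem_cons_of_mem _ hw, hwx⟩) with rfl | h'
      · omega
      · exact h'
    · rw [if_neg hc0]
      have hcpos : 0 < c.getD v 0 := by omega
      have hcn : ((c.getD v 0).toNat : Int) = c.getD v 0 := Int.toNat_of_nonneg (by omega)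
      have hmod : PySem.Int.mod (c.getD v 0) 3 = (((c.getD v 0).toNat % 3 : Nat) : Int) := by
        rw [PySem.Int.mod_eq_emod_of_pos (by omega)]
        omega
      have hH' : ∀ (c' : PySem.Dict Int Int),
          (∀ x, c'.getD x 0 ≤ c.getD x 0) →
          ∀ x : Int, 0 < c'.getD x 0 → (∃ w ∈ vs, w ≤ x) → x ∈ vs := by
        intro c' hle x hx ⟨w, hw, hwx⟩
        rcases List.mem_cons.1
            (hH x (lt_of_lt_of_le hx (hle x)) ⟨w, List.mem_cons_of_mem _ hw, hwx⟩) with rfl | h'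
        · have := hlt w hw; omega
        · exact h'
      by_cases hr : PySem.Int.mod (c.getD v 0) 3 ≠ 0
      · rw [if_pos hr]
        have hrn : (c.getD v 0).toNat % 3 ≠ 0 := by
          intro h0; rw [hmod, h0] at hr; exact hr rfl
        by_cases hg : c.getD (v + 1) 0 < PySem.Int.mod (c.getD v 0) 3 ∨
            c.getD (v + 2) 0 < PySem.Int.mod (c.getD v 0) 3
        · rw [if_pos (by simpa using hg)]
          simp only [Bool.false_eq_true, false_iff]
          rintro ⟨k, hd⟩
          obtain ⟨m', k', hmeq, _, _⟩ :=
            pvGreedyStep (c.getD v 0).toNat hcount_v (by omega) hminM hd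
          have hc1 : ((c.getD v 0).toNat % 3 : Nat) ≤ (pvM (v :: vs) c).count (v + 1) := by
            rw [hmeq]
            simp only [Multiset.count_add, Multiset.count_replicate]
            split_ifs <;> omega
          have hc2 : ((c.getD v 0).toNat % 3 : Nat) ≤ (pvM (v :: vs) c).count (v + 2) := by
            rw [hmeq]
            simp only [Multiset.count_add, Multiset.count_replicate]
            split_ifs <;> omega
          rw [pvM_count_ge hnd c hH v (v + 1) (List.mem_cons_self ..) (by omega)] at hc1
          rw [pvM_count_ge hnd c hH v (v + 2) (List.mem_cons_self ..) (by omega)] at hc2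
          rw [hmod] at hg
          omega
        · rw [if_neg (by simpa using hg)]
          push Not at hg
          obtain ⟨hg1, hg2⟩ := hg
          rw [hmod] at hg1 hg2
          have hv1 : v + 1 ∈ vs := by
            rcases List.mem_cons.1 (hH (v + 1) (by omega) ⟨v, List.mem_cons_self .., by omega⟩)
              with h' | h'
            · omega
            · exact h'
          have hv2 : v + 2 ∈ vs := by
            rcases List.mem_cons.1 (hH (v + 2) (by omega) ⟨v, List.mem_cons_self .., by omega⟩)
              with h' | h'
            · omega
            · exact h'
          set c1 := c.insert (v + 1) (c.getD (v + 1) 0 - PySem.Int.mod (c.getD v 0) 3) with hc1def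
          set c2 := c1.insert (v + 2) (c1.getD (v + 2) 0 - PySem.Int.mod (c.getD v 0) 3) with hc2def
          have hgetD2 : ∀ x, c2.getD x 0 =
              if x = v + 2 then c.getD (v + 2) 0 - (((c.getD v 0).toNat % 3 : Nat) : Int)
              else if x = v + 1 then c.getD (v + 1) 0 - (((c.getD v 0).toNat % 3 : Nat) : Int)
              else c.getD x 0 := by
            intro x
            rw [hc2def, PySem.Dict.getD_insert, hc1def, PySem.Dict.getD_insert,
              PySem.Dict.getD_insert, hmod]
            split_ifs with h1 h2 <;> simp_all
          have hE : pvM (v :: vs) c =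
              (Multiset.replicate (c.getD v 0).toNat v +
               Multiset.replicate ((c.getD v 0).toNat % 3) (v + 1) +
               Multiset.replicate ((c.getD v 0).toNat % 3) (v + 2)) + pvM vs c2 := by
            ext x
            rw [pvM_count hnd]
            simp only [Multiset.count_add, Multiset.count_replicate, pvM_count hnd',
              List.mem_cons, hgetD2]
            split_ifs <;> subst_vars <;> first | rfl | omega | tauto
          have hnn2 : ∀ x, 0 ≤ c2.getD x 0 := by
            intro x
            rw [hgetD2]
            split_ifs <;> subst_vars <;> first | omega | exact hnn x
          have hle2 : ∀ x, c2.getD x 0 ≤ c.getD x 0 := by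
            intro x
            rw [hgetD2]
            split_ifs with h1 h2 <;> subst_vars <;> omega
          rw [ih c2 (List.pairwise_cons.1 hpw).2 (hH' c2 hle2) hnn2]
          constructor
          · rintro ⟨k, hd⟩
            refine ⟨k + (c.getD v 0).toNat % 3 + (c.getD v 0).toNat / 3, ?_⟩
            have hruns := pvDecomp_add_runs ((c.getD v 0).toNat % 3) v hd
            have hpungs := pvDecomp_add_pungs ((c.getD v 0).toNat / 3) v hruns
            rw [hE]
            have hsplit : Multiset.replicate (c.getD v 0).toNat v =
                Multiset.replicate (3 * ((c.getD v 0).toNat / 3)) v +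
                Multiset.replicate ((c.getD v 0).toNat % 3) v := by
              rw [← Multiset.replicate_add]
              congr 1
              omega
            have hms : (Multiset.replicate (c.getD v 0).toNat v +
                Multiset.replicate ((c.getD v 0).toNat % 3) (v + 1) +
                Multiset.replicate ((c.getD v 0).toNat % 3) (v + 2)) + pvM vs c2 =
                Multiset.replicate (3 * ((c.getD v 0).toNat / 3)) v +
                (Multiset.replicate ((c.getD v 0).toNat % 3) v +
                 Multiset.replicate ((c.getD v 0).toNat % 3) (v + 1) +
                 Multiset.replicate ((c.getD v 0).toNat % 3) (v + 2) + pvM vs c2) := by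
              rw [hsplit]
              ext a
              simp only [Multiset.count_add, Multiset.count_replicate]
              split_ifs <;> omega
            rw [hms]
            exact hpungs
          · rintro ⟨k, hd⟩
            obtain ⟨m', k', hmeq, _, hd'⟩ :=
              pvGreedyStep (c.getD v 0).toNat hcount_v (by omega) hminM hd
            rw [hE] at hmeq
            have : pvM vs c2 = m' := add_left_cancel hmeq
            exact ⟨k', this ▸ hd'⟩
      · rw [if_neg hr]
        push Not at hr
        have hrn : (c.getD v 0).toNat % 3 = 0 := by
          rw [hmod] at hr
          omega
        have hE : pvM (v :: vs) c = Multiset.replicate (c.getD v 0).toNat v + pvM vs c := hstep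
        rw [ih c (List.pairwise_cons.1 hpw).2 (hH' c (fun x => le_refl _)) hnn]
        constructor
        · rintro ⟨k, hd⟩
          refine ⟨k + (c.getD v 0).toNat / 3, ?_⟩
          have hpungs := pvDecomp_add_pungs ((c.getD v 0).toNat / 3) v hd
          rw [hE]
          have hrw : Multiset.replicate (c.getD v 0).toNat v =
              Multiset.replicate (3 * ((c.getD v 0).toNat / 3)) v := by
            congr 1
            omega
          rw [hrw]
          exact hpungs
        · rintro ⟨k, hd⟩
          obtain ⟨m', k', hmeq, _, hd'⟩ :=
            pvGreedyStep (c.getD v 0).toNat hcount_v (by omega) hminM hd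
          rw [hrn] at hmeq
          simp only [Multiset.replicate_zero, add_zero] at hmeq
          rw [hE] at hmeq
          have : pvM vs c = m' := add_left_cancel hmeq
          exact ⟨k', this ▸ hd'⟩

-- the common value: thirteen orphans, or some pair + a decomposition of the rest
def pvP (hand : List Int) (exposed : List (List Int)) : Prop :=
  (exposed.length == 0 && PySem.Set.equal (PySem.Set.ofList hand)
      (PySem.Set.ofList ([1,9,11,19,21,29,31,32,33,34,41,42,43] : List Int))) = true
    ∨ ∃ t, t ∈ hand ∧ 2 ≤ hand.count t ∧ ∃ (k : Nat) (mt : Multiset Int),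
        (k : Int) = 4 - exposed.length ∧ (↑hand : Multiset Int) = t ::ₘ t ::ₘ mt ∧ pvDecomp mt k

theorem pvA_char (hand : List Int) (exposed : List (List Int)) :
    is_valid_14 hand exposed = true ↔ pvP hand exposed := by
  rw [is_valid_14, pvP]
  by_cases horph : (exposed.length == 0 && PySem.Set.equal (PySem.Set.ofList hand)
      (PySem.Set.ofList ([1,9,11,19,21,29,31,32,33,34,41,42,43] : List Int))) = true
  · rw [if_pos horph]
    simp [horph]
  · rw [if_neg horph]
    set sh := PySem.List.sorted hand (fun x => x) false with hshdef
    have hsp : sh.Perm hand := PySem.List.sorted_perm hand (fun x => x) false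
    have hcoe : (↑hand : Multiset Int) = ↑sh := (Multiset.coe_eq_coe.2 hsp).symm
    rw [List.any_eq_true]
    constructor
    · rintro ⟨tile, htile, hf⟩
      have hts : tile ∈ sh := (PySem.Set.mem_ofList _ _).1 htile
      by_cases hc2 : 2 ≤ sh.count tile
      · rw [if_pos hc2] at hf
        rw [PySem.List.remove?_eq_some_erase _ _ hts] at hf
        dsimp only at hf
        have hts2 : tile ∈ sh.erase tile := by
          have hce : (sh.erase tile).count tile = sh.count tile - 1 := List.count_erase_self
          by_contra hno
          have := List.count_eq_zero.2 hno
          omega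
        rw [PySem.List.remove?_eq_some_erase _ _ hts2] at hf
        dsimp only at hf
        rw [pvCffm_char] at hf
        obtain ⟨k, hk, hd⟩ := hf
        have p1 : (↑sh : Multiset Int) = tile ::ₘ ↑(sh.erase tile) :=
          Multiset.coe_eq_coe.2 (List.perm_cons_erase hts)
        have p2 : (↑(sh.erase tile) : Multiset Int) = tile ::ₘ ↑((sh.erase tile).erase tile) :=
          Multiset.coe_eq_coe.2 (List.perm_cons_erase hts2)
        refine Or.inr ⟨tile, hsp.mem_iff.1 hts, ?_, k, ↑((sh.erase tile).erase tile), hk, ?_, hd⟩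
        · rw [← hsp.count_eq]
          exact hc2
        · rw [hcoe, p1, p2]
      · rw [if_neg hc2] at hf
        cases hf
    · rintro (h | ⟨t, hth, htc, k, mt, hk, hmeq, hd⟩)
      · exact absurd h horph
      · have hts : t ∈ sh := hsp.mem_iff.2 hth
        have hc2 : 2 ≤ sh.count t := by
          rw [hsp.count_eq]
          exact htc
        refine ⟨t, (PySem.Set.mem_ofList _ _).2 hts, ?_⟩
        rw [if_pos hc2]
        rw [PySem.List.remove?_eq_some_erase _ _ hts]
        dsimp only
        have hts2 : t ∈ sh.erase t := by
          have hce : (sh.erase t).count t = sh.count t - 1 := List.count_erase_self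
          by_contra hno
          have := List.count_eq_zero.2 hno
          omega
        rw [PySem.List.remove?_eq_some_erase _ _ hts2]
        dsimp only
        rw [pvCffm_char]
        have p1 : (↑sh : Multiset Int) = t ::ₘ ↑(sh.erase t) :=
          Multiset.coe_eq_coe.2 (List.perm_cons_erase hts)
        have p2 : (↑(sh.erase t) : Multiset Int) = t ::ₘ ↑((sh.erase t).erase t) :=
          Multiset.coe_eq_coe.2 (List.perm_cons_erase hts2)
        have e : t ::ₘ t ::ₘ mt = t ::ₘ t ::ₘ (↑((sh.erase t).erase t) : Multiset Int) := by
          rw [← hmeq, hcoe, p1, p2]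
        have e2 : mt = (↑((sh.erase t).erase t) : Multiset Int) :=
          (Multiset.cons_inj_right t).1 ((Multiset.cons_inj_right t).1 e)
        exact ⟨k, hk, e2 ▸ hd⟩

theorem pvB_char (hand : List Int) (exposed : List (List Int)) :
    is_valid_14_alt hand exposed = true ↔ pvP hand exposed := by
  rw [is_valid_14_alt, pvP]
  by_cases horph : (exposed.length == 0 && PySem.Set.equal (PySem.Set.ofList hand)
      (PySem.Set.ofList ([1,9,11,19,21,29,31,32,33,34,41,42,43] : List Int))) = true
  · rw [if_pos horph]
    simp [horph]
  · rw [if_neg horph]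
    have key : ∀ t, t ∈ hand → 2 ≤ hand.count t →
        (pvGreedy ((PySem.Dict.counter hand).insert t ((PySem.Dict.counter hand).getD t 0 - 2)) = true
          ↔ ∃ k, pvDecomp (pvM (PySem.List.sorted (PySem.Set.ofList hand) (fun x => x) false)
              ((PySem.Dict.counter hand).insert t ((PySem.Dict.counter hand).getD t 0 - 2))) k)
        ∧ (↑hand : Multiset Int) = t ::ₘ t ::ₘ
            pvM (PySem.List.sorted (PySem.Set.ofList hand) (fun x => x) false)
              ((PySem.Dict.counter hand).insert t ((PySem.Dict.counter hand).getD t 0 - 2)) := by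
      intro t hth htc
      set ct := (PySem.Dict.counter hand).insert t ((PySem.Dict.counter hand).getD t 0 - 2)
        with hctdef
      set vs := PySem.List.sorted (PySem.Set.ofList hand) (fun x => x) false with hvsdef
      have hvsperm : vs.Perm (PySem.Set.ofList hand) :=
        PySem.List.sorted_perm (PySem.Set.ofList hand) (fun x => x) false
      have hvsmem : ∀ x : Int, x ∈ vs ↔ x ∈ hand := by
        intro x
        rw [hvsperm.mem_iff]
        exact PySem.Set.mem_ofList hand x
      have hndvs : vs.Nodup := hvsperm.symm.nodup (PySem.Set.nodup_ofList hand)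
      have hpw : vs.Pairwise (· < ·) := PySem.List.sorted_ofList_pairwise_lt hand
      have hgd : ∀ x : Int, ct.getD x 0 =
          if x = t then (hand.count t : Int) - 2 else (hand.count x : Int) := by
        intro x
        rw [hctdef, PySem.Dict.getD_insert, PySem.Dict.getD_counter, PySem.Dict.getD_counter]
      have hH : ∀ x : Int, 0 < ct.getD x 0 → (∃ w ∈ vs, w ≤ x) → x ∈ vs := by
        intro x hx _
        rw [hgd] at hx
        rw [hvsmem]
        split_ifs at hx with hxt
        · exact hxt ▸ hth
        · by_contra hno
          rw [List.count_eq_zero.2 hno] at hx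
          omega
      have hnn : ∀ x : Int, 0 ≤ ct.getD x 0 := by
        intro x
        rw [hgd]
        split_ifs with hxt
        · subst hxt; omega
        · positivity
      have hkeys : ct.keys = PySem.Set.ofList hand := by
        rw [hctdef, PySem.Dict.keys_insert_of_contains _ _
            ((PySem.Dict.contains_iff_mem_keys _ _).2
              (by rw [PySem.Dict.keys_counter]; exact (PySem.Set.mem_ofList _ _).2 hth)),
          PySem.Dict.keys_counter]
      constructor
      · rw [pvGreedy, hkeys, ← hvsdef]
        exact pvGreedyGo_char vs ct hpw hH hnn
      · ext x
        simp only [Multiset.coe_count, Multiset.count_cons, pvM_count hndvs, hvsmem, hgd]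
        by_cases hx : x = t
        · subst hx
          rw [if_pos hth]
          simp only [if_true]
          omega
        · rw [if_neg hx, if_neg hx]
          by_cases hm : x ∈ hand
          · rw [if_pos hm]
            omega
          · rw [if_neg hm, List.count_eq_zero.2 hm]
    by_cases hg : (4 - (exposed.length : Int) < 0 ∨
        (hand.length : Int) ≠ 3 * (4 - (exposed.length : Int)) + 2)
    · rw [if_pos (by simpa using hg)]
      simp only [Bool.false_eq_true, false_iff]
      rintro (h | ⟨t, hth, htc, k, mt, hk, hmeq, hd⟩)
      · exact horph h
      · have hcard := pvDecomp_card hd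
        have hc2 : Multiset.card (↑hand : Multiset Int) = 2 + 3 * k := by
          rw [hmeq]
          simp only [Multiset.card_cons, hcard]
          omega
        rw [Multiset.coe_card] at hc2
        omega
    · rw [if_neg (by simpa using hg)]
      push Not at hg
      obtain ⟨hg1, hg2⟩ := hg
      simp only [PySem.Dict.foldl_insert_getD_add_one_eq_counter, PySem.Dict.keys_counter]
      rw [List.any_eq_true]
      constructor
      · rintro ⟨pair, hpmem, hf⟩
        have hph : pair ∈ hand := (PySem.Set.mem_ofList _ _).1 hpmem
        by_cases hcp : 2 ≤ (PySem.Dict.counter hand).getD pair 0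
        · rw [if_pos hcp] at hf
          have hcnt2 : 2 ≤ hand.count pair := by
            rw [PySem.Dict.getD_counter] at hcp
            exact_mod_cast hcp
          obtain ⟨hiff, hMeq⟩ := key pair hph hcnt2
          rw [hiff] at hf
          obtain ⟨k, hd⟩ := hf
          have hcard := pvDecomp_card hd
          have hc2 : Multiset.card (↑hand : Multiset Int) = 2 + 3 * k := by
            rw [hMeq]
            simp only [Multiset.card_cons, hcard]
            omega
          rw [Multiset.coe_card] at hc2
          exact Or.inr ⟨pair, hph, hcnt2, k, _, by omega, hMeq, hd⟩
        · rw [if_neg hcp] at hf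
          cases hf
      · rintro (h | ⟨t, hth, htc, k, mt, hk, hmeq, hd⟩)
        · exact absurd h horph
        · obtain ⟨hiff, hMeq⟩ := key t hth htc
          refine ⟨t, (PySem.Set.mem_ofList _ _).2 hth, ?_⟩
          rw [if_pos (show 2 ≤ (PySem.Dict.counter hand).getD t 0 by
            rw [PySem.Dict.getD_counter]
            exact_mod_cast htc)]
          rw [hiff]
          have e := hmeq.symm.trans hMeq
          have e2 := (Multiset.cons_inj_right t).1 ((Multiset.cons_inj_right t).1 e)
          exact ⟨k, e2 ▸ hd⟩

theorem pvPorts_eq (hand : List Int) (exposed : List (List Int)) :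
    is_valid_14 hand exposed = is_valid_14_alt hand exposed := by
  rw [Bool.eq_iff_iff, pvA_char, pvB_char]

-- ===== VERDICT (by name: the statement is the Claim_ definition above) =====
theorem is_valid_14_spec : Claim_equal_is_valid_14 := by
  intro hand exposed _
  show is_valid_14 hand exposed = is_valid_14_alt hand exposed
  exact pvPorts_eq hand exposed
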